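-- pv_equiv track=rewrite | github.com/dhenandi/ran_sql | scripts/generate_sql_training_data.py | identify_kpi_columns
-- ===== SOURCE A (Python) =====
-- def identify_kpi_columns(columns):
--     """Identify KPI columns from column names."""
--     kpi_patterns = [
--         'rsrp', 'rsrq', 'sinr', 'throughput', 'latency',
--         'bler', 'cqi', 'drop', 'call', 'success',
--         'availability', 'utilization', 'traffic', 'erlang',
--         'count', 'rate', 'ratio', 'pct', 'avg', 'max', 'min'
--     ]
--     return [col for col in columns if any(p in col.lower() for p in kpi_patterns)]
-- ===== SOURCE B (Python) =====
-- def identify_kpi_columns(columns):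
--     """Identify KPI columns from column names."""
--     kpi_patterns = [
--         'rsrp', 'rsrq', 'sinr', 'throughput', 'latency',
--         'bler', 'cqi', 'drop', 'call', 'success',
--         'availability', 'utilization', 'traffic', 'erlang',
--         'count', 'rate', 'ratio', 'pct', 'avg', 'max', 'min'
--     ]
--     # index the patterns by first character once
--     by_first = {}
--     for p in kpi_patterns:
--         by_first.setdefault(p[0], []).append(p)
--
--     def has_kpi(s):
--         # scan positions left to right; only patterns whose first char matches are tried
--         i = 0
--         n = len(s)
--         while i < n:
--             for p in by_first.get(s[i], ()):
--                 if s.startswith(p, i):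
--                     return True
--             i += 1
--         return False
--
--     out = []
--     for col in columns:
--         if has_kpi(col.lower()):
--             out.append(col)
--     return out
-- ===== Notes on version B (the rewrite author's own statement) =====
-- stated objective: alternative
-- what changed: A tests each of the 21 patterns with a separate 'p in col.lower()' substring search inside a comprehension; B indexes the patterns by first character in a dict built once, then scans each lowered column position by position trying only the patterns whose first character matches, accumulating matching columns with an explicit loop.
import Mathlib
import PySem

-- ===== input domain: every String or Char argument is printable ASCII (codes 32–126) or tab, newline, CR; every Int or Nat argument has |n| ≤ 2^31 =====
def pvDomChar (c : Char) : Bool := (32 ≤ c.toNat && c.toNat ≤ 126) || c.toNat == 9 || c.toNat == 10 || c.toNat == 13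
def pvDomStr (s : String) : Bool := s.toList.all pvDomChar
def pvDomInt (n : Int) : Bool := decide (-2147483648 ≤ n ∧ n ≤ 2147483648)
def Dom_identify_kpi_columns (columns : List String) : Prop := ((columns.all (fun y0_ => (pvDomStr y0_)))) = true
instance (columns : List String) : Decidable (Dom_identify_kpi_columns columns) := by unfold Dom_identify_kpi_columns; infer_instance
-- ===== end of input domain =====

-- B replaces A's per-pattern 'in' substring tests inside a comprehension by a recursion over
-- each lowered column's positions, with the patterns indexed by first character in a dict so
-- only matching-head patterns are tried at each position, and an explicit
-- accumulating loop over the columns; same output, alternative decomposition.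

-- ===== PORT A =====
def kpiPatternsA : List String :=
  ["rsrp", "rsrq", "sinr", "throughput", "latency",
   "bler", "cqi", "drop", "call", "success",
   "availability", "utilization", "traffic", "erlang",
   "count", "rate", "ratio", "pct", "avg", "max", "min"]

def identify_kpi_columns (columns : List String) : List String :=
  columns.filter (fun col => kpiPatternsA.any (fun p => PySem.Str.isIn p (PySem.Str.lower col)))

-- ===== PORT B =====
def kpiPatternsB : List String :=
  ["rsrp", "rsrq", "sinr", "throughput", "latency",
   "bler", "cqi", "drop", "call", "success",
   "availability", "utilization", "traffic", "erlang",
   "count", "rate", "ratio", "pct", "avg", "max", "min"]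

-- `by_first.setdefault(p[0], []).append(p)` built by the same fold over the patterns
def kpiByFirst : PySem.Dict Char (List String) :=
  kpiPatternsB.foldl
    (fun d p =>
      match p.toList with
      | [] => d
      | c :: _ => d.insert c (d.getD c [] ++ [p]))
    PySem.Dict.empty

-- `has_kpi`: the positional while-loop scan, as the obvious structural recursion on the
-- remaining suffix; at each position only the patterns indexed under the current char
-- are tried (Python's s.startswith(p, i) is startswith on the suffix from i).
def hasKpi : List Char → Bool
  | [] => false
  | c :: rest =>
    if (kpiByFirst.getD c []).any (fun p => PySem.Chars.startswith (c :: rest) p.toList) then true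
    else hasKpi rest

-- the explicit `for col in columns: … out.append(col)` loop, as structural recursion
def identify_kpi_columns_alt : List String → List String
  | [] => []
  | col :: rest =>
    if hasKpi (PySem.Str.lower col).toList then col :: identify_kpi_columns_alt rest
    else identify_kpi_columns_alt rest

-- ===== PRECONDITION & SPEC =====
def Spec_identify_kpi_columns (columns : List String) (out : List String) : Prop := out = identify_kpi_columns_alt columns
instance (columns : List String) (out : List String) : Decidable (Spec_identify_kpi_columns columns out) := by unfold Spec_identify_kpi_columns; infer_instance

-- ===== CLAIM =====
def Claim_equal_identify_kpi_columns : Prop := ∀ (columns : List String), Dom_identify_kpi_columns columns → Spec_identify_kpi_columns columns (identify_kpi_columns columns)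

-- ===== LEMMAS AND PROOFS =====

lemma kpiByFirst_eq : kpiByFirst = PySem.Dict.mk
    [('r', ["rsrp", "rsrq", "rate", "ratio"]),
     ('s', ["sinr", "success"]),
     ('t', ["throughput", "traffic"]),
     ('l', ["latency"]),
     ('b', ["bler"]),
     ('c', ["cqi", "call", "count"]),
     ('d', ["drop"]),
     ('a', ["availability", "avg"]),
     ('u', ["utilization"]),
     ('e', ["erlang"]),
     ('p', ["pct"]),
     ('m', ["max", "min"])] := by decide

-- every pattern stored under key c is one of the patterns
lemma getD_subset (c : Char) (p : String) (hp : p ∈ kpiByFirst.getD c []) :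
    p ∈ kpiPatternsB := by
  rw [kpiByFirst_eq] at hp
  simp only [PySem.Dict.getD, PySem.Dict.get?, List.find?] at hp
  (repeat' split at hp) <;> simp_all [kpiPatternsB] <;> tauto

-- every pattern whose first char is c is stored under key c
lemma getD_complete (p : String) (hp : p ∈ kpiPatternsB) (c : Char)
    (hc : p.toList.head? = some c) : p ∈ kpiByFirst.getD c [] := by
  simp only [kpiPatternsB, List.mem_cons, List.not_mem_nil, or_false] at hp
  rcases hp with rfl|rfl|rfl|rfl|rfl|rfl|rfl|rfl|rfl|rfl|rfl|rfl|rfl|rfl|rfl|rfl|rfl|rfl|rfl|rfl|rfl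
  · rw [show ("rsrp".toList.head?) = some 'r' from by decide] at hc
    obtain rfl := Option.some.inj hc
    decide
  · rw [show ("rsrq".toList.head?) = some 'r' from by decide] at hc
    obtain rfl := Option.some.inj hc
    decide
  · rw [show ("sinr".toList.head?) = some 's' from by decide] at hc
    obtain rfl := Option.some.inj hc
    decide
  · rw [show ("throughput".toList.head?) = some 't' from by decide] at hc
    obtain rfl := Option.some.inj hc
    decide
  · rw [show ("latency".toList.head?) = some 'l' from by decide] at hc
    obtain rfl := Option.some.inj hc
    decide
  · rw [show ("bler".toList.head?) = some 'b' from by decide] at hc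
    obtain rfl := Option.some.inj hc
    decide
  · rw [show ("cqi".toList.head?) = some 'c' from by decide] at hc
    obtain rfl := Option.some.inj hc
    decide
  · rw [show ("drop".toList.head?) = some 'd' from by decide] at hc
    obtain rfl := Option.some.inj hc
    decide
  · rw [show ("call".toList.head?) = some 'c' from by decide] at hc
    obtain rfl := Option.some.inj hc
    decide
  · rw [show ("success".toList.head?) = some 's' from by decide] at hc
    obtain rfl := Option.some.inj hc
    decide
  · rw [show ("availability".toList.head?) = some 'a' from by decide] at hc
    obtain rfl := Option.some.inj hc
    decide
  · rw [show ("utilization".toList.head?) = some 'u' from by decide] at hc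
    obtain rfl := Option.some.inj hc
    decide
  · rw [show ("traffic".toList.head?) = some 't' from by decide] at hc
    obtain rfl := Option.some.inj hc
    decide
  · rw [show ("erlang".toList.head?) = some 'e' from by decide] at hc
    obtain rfl := Option.some.inj hc
    decide
  · rw [show ("count".toList.head?) = some 'c' from by decide] at hc
    obtain rfl := Option.some.inj hc
    decide
  · rw [show ("rate".toList.head?) = some 'r' from by decide] at hc
    obtain rfl := Option.some.inj hc
    decide
  · rw [show ("ratio".toList.head?) = some 'r' from by decide] at hc
    obtain rfl := Option.some.inj hc
    decide
  · rw [show ("pct".toList.head?) = some 'p' from by decide] at hc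
    obtain rfl := Option.some.inj hc
    decide
  · rw [show ("avg".toList.head?) = some 'a' from by decide] at hc
    obtain rfl := Option.some.inj hc
    decide
  · rw [show ("max".toList.head?) = some 'm' from by decide] at hc
    obtain rfl := Option.some.inj hc
    decide
  · rw [show ("min".toList.head?) = some 'm' from by decide] at hc
    obtain rfl := Option.some.inj hc
    decide

lemma head_of_prefix {p : List Char} {c : Char} {t : List Char}
    (hne : p ≠ []) (h : p <+: c :: t) : p.head? = some c := by
  obtain ⟨l, hl⟩ := h
  cases p with
  | nil => exact absurd rfl hne
  | cons a as => simpa using congrArg List.head? hl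

-- at a position whose char is c, testing only the patterns indexed under c
-- is the same as testing all patterns (others cannot start with c)
lemma any_first (c : Char) (t : List Char) :
    ((kpiByFirst.getD c []).any fun p => PySem.Chars.startswith (c :: t) p.toList) =
    (kpiPatternsB.any fun p => PySem.Chars.startswith (c :: t) p.toList) := by
  rw [Bool.eq_iff_iff]
  simp only [List.any_eq_true, PySem.Chars.startswith_iff]
  constructor
  · rintro ⟨p, hp, hpre⟩
    exact ⟨p, getD_subset c p hp, hpre⟩
  · rintro ⟨p, hp, hpre⟩
    have hall : ∀ q ∈ kpiPatternsB, q.toList ≠ [] := by decide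
    have hne : p.toList ≠ [] := hall p hp
    exact ⟨p, getD_complete p hp c (head_of_prefix hne hpre), hpre⟩

lemma hasKpi_iff (s : List Char) :
    hasKpi s = true ↔ ∃ p ∈ kpiPatternsB, p.toList <:+: s := by
  induction s with
  | nil =>
    simp only [hasKpi]
    constructor
    · intro h; exact absurd h (by decide)
    · rintro ⟨p, hp, hinf⟩
      have hne : ∀ q ∈ kpiPatternsB, q.toList ≠ [] := by decide
      exact absurd (List.eq_nil_of_infix_nil hinf) (hne p hp)
  | cons c rest ih =>
    simp only [hasKpi, any_first]
    split_ifs with h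
    · simp only [true_iff]
      simp only [List.any_eq_true, PySem.Chars.startswith_iff] at h
      obtain ⟨p, hp, hpre⟩ := h
      exact ⟨p, hp, hpre.isInfix⟩
    · rw [ih]
      constructor
      · rintro ⟨p, hp, hi⟩; exact ⟨p, hp, hi.trans (List.suffix_cons c rest).isInfix⟩
      · rintro ⟨p, hp, hi⟩
        rcases List.infix_cons_iff.mp hi with hpre | hi'
        · exact absurd (by simp only [List.any_eq_true, PySem.Chars.startswith_iff]; exact ⟨p, hp, hpre⟩) h
        · exact ⟨p, hp, hi'⟩

lemma per_column (s : List Char) :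
    (kpiPatternsA.any (fun p => PySem.Chars.isIn p.toList s)) = hasKpi s := by
  rw [Bool.eq_iff_iff, hasKpi_iff]
  simp only [List.any_eq_true, PySem.Chars.isIn_iff_infix]
  exact Iff.rfl

lemma main_eq (columns : List String) :
    identify_kpi_columns columns = identify_kpi_columns_alt columns := by
  induction columns with
  | nil => rfl
  | cons col rest ih =>
    have hpred : (kpiPatternsA.any fun p => PySem.Str.isIn p (PySem.Str.lower col)) = hasKpi (PySem.Str.lower col).toList := by
      simpa [PySem.Str.isIn] using per_column (PySem.Str.lower col).toList
    simp only [identify_kpi_columns] at ih ⊢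
    rw [List.filter_cons, hpred]
    simp only [PySem.Str.toList_lower] at ⊢
    rw [identify_kpi_columns_alt]
    simp only [PySem.Str.toList_lower]
    split_ifs with h <;> rw [ih]

-- ===== VERDICT =====
theorem identify_kpi_columns_spec : Claim_equal_identify_kpi_columns := by
  intro columns _
  exact main_eq columns
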